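-- pv_equiv track=rewrite | github.com/asheorann/bioinformatics_algorithms | 02_Regulatory_Motifs/2.1_Motif_Enumeration.py | inAllStrings
-- ===== SOURCE A (Python) =====
-- def inAllStrings(dna: list[str], pattern: str, d: int) -> bool:
--     for i in range(len(dna)):
--         length = len(dna[i])
--         found = False
--         l = len(pattern)
--         for j in range(length-l+1):
--             if hamming_distance(pattern, dna[i][j:j+len(pattern)])<=d:
--                 found = True
--                 break
--         if found==False:
--             return False
--     return True
--
-- def hamming_distance(p: str, q: str) -> int:
--     """Calculate the Hamming distance between two strings."""
--     count = 0
--     for i in range(len(p)):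
--         if p[i]!=q[i]:
--             count+=1
--     return count
-- ===== SOURCE B (Python) =====
-- def inAllStrings(dna: list[str], pattern: str, d: int) -> bool:
--     # Transposed sweep: instead of slicing each window and computing its Hamming
--     # distance, keep one mismatch counter per window start and sweep the pattern
--     # position by position, bumping every window's counter at once.
--     l = len(pattern)
--
--     def ok(s):
--         m = len(s) - l + 1
--         if m < 0:
--             m = 0
--         counts = [0] * m
--         for i, ch in enumerate(pattern):
--             counts = [c + (1 if s[j + i] != ch else 0) for j, c in enumerate(counts)]
--         return any(c <= d for c in counts)
--
--     return all(ok(s) for s in dna)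
-- ===== Notes on version B (the rewrite author's own statement) =====
-- stated objective: alternative
-- what changed: Replaces per-window slicing plus a Hamming-distance helper by a transposed sweep that keeps one mismatch counter per window start and updates all of them while walking the pattern once, then checks any counter is within d.
import Mathlib
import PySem

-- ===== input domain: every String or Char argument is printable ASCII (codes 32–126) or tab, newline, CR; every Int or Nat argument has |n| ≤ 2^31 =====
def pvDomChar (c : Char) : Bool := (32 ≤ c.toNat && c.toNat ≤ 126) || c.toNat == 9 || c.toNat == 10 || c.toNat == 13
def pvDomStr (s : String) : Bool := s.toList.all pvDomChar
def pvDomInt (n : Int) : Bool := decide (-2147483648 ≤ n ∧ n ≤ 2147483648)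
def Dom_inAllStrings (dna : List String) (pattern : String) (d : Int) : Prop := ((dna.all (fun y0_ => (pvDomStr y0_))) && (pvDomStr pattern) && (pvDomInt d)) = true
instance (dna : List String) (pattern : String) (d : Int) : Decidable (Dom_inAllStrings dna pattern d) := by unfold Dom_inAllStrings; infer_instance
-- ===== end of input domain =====

-- B replaces per-window slicing + a Hamming helper by a transposed sweep keeping one
-- mismatch counter per window start (alternative decomposition, same asymptotic cost).


-- ===== PORT A =====
-- helper hamming_distance; indices are always in range at A's call sites (the slice has
-- exactly pattern's length), so pyGetD with a default is exact here
def hammingDistance (p q : List Char) : Int :=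
  (PySem.List.pyRange 0 (p.length : Int) 1).foldl
    (fun count i =>
      if PySem.List.pyGetD p i ' ' ≠ PySem.List.pyGetD q i ' ' then count + 1 else count) 0

-- outer loop with early 'return False' = all; inner loop with break = any
def inAllStrings (dna : List String) (pattern : String) (d : Int) : Bool :=
  dna.all (fun s =>
    (PySem.List.pyRange 0 ((s.toList.length : Int) - (pattern.toList.length : Int) + 1) 1).any
      (fun j => decide (hammingDistance pattern.toList
        (PySem.List.slice s.toList (some j) (some (j + (pattern.toList.length : Int)))) ≤ d)))

-- ===== PORT B =====
-- one pattern step: bump the counter of every window whose character at this offset mismatches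
def altStep (t : List Char) (counts : List Nat) (ci : Char × Nat) : List Nat :=
  counts.zipIdx.map (fun cj => if t.getD (cj.2 + ci.2) ' ' ≠ ci.1 then cj.1 + 1 else cj.1)

def altOk (p t : List Char) (d : Int) : Bool :=
  let counts := (p.zipIdx).foldl (altStep t) (List.replicate (t.length + 1 - p.length) 0)
  counts.any (fun c => decide ((c : Int) ≤ d))

def inAllStrings_alt (dna : List String) (pattern : String) (d : Int) : Bool :=
  dna.all (fun s => altOk pattern.toList s.toList d)

-- ===== PRECONDITION & SPEC =====
def Spec_inAllStrings (dna : List String) (pattern : String) (d : Int) (out : Bool) : Prop := out = inAllStrings_alt dna pattern d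
instance (dna : List String) (pattern : String) (d : Int) (out : Bool) : Decidable (Spec_inAllStrings dna pattern d out) := by unfold Spec_inAllStrings; infer_instance

-- ===== CLAIM (what is proved, stated in full; the proofs are below) =====
def Claim_equal_inAllStrings : Prop := ∀ (dna : List String) (pattern : String) (d : Int), Dom_inAllStrings dna pattern d → Spec_inAllStrings dna pattern d (inAllStrings dna pattern d)

-- ===== LEMMAS AND PROOFS =====

theorem length_altStep (t : List Char) (c : List Nat) (ci : Char × Nat) :
    (altStep t c ci).length = c.length := by
  simp [altStep]

theorem length_foldl_altStep (t : List Char) :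
    ∀ (p : List Char) (k : Nat) (c : List Nat),
      ((p.zipIdx k).foldl (altStep t) c).length = c.length := by
  intro p
  induction p with
  | nil => intro k c; rfl
  | cons a p' ih =>
      intro k c
      rw [List.zipIdx_cons, List.foldl_cons, ih, length_altStep]

theorem getD_foldl_altStep (t : List Char) :
    ∀ (p : List Char) (k : Nat) (c : List Nat) (j : Nat), j < c.length →
      ((p.zipIdx k).foldl (altStep t) c).getD j 0
        = c.getD j 0 + (List.range p.length).countP
            (fun i => decide (t.getD (j + (k + i)) ' ' ≠ p.getD i ' ')) := by
  intro p
  induction p with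
  | nil => intro k c j hj; simp
  | cons a p' ih =>
      intro k c j hj
      rw [List.zipIdx_cons, List.foldl_cons]
      have hj' : j < (altStep t c (a, k)).length := by rw [length_altStep]; exact hj
      rw [ih (k + 1) (altStep t c (a, k)) j hj']
      have hstep : (altStep t c (a, k)).getD j 0
          = if t.getD (j + k) ' ' ≠ a then c.getD j 0 + 1 else c.getD j 0 := by
        simp only [altStep]
        rw [List.getD_eq_getElem _ _ (by simpa using hj), List.getD_eq_getElem _ _ hj]
        simp [List.getElem_zipIdx]
      rw [hstep]
      simp only [List.length_cons]
      rw [List.range_succ_eq_map, List.countP_cons, List.countP_map]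
      have harith : ∀ i : Nat, j + (k + Nat.succ i) = j + ((k + 1) + i) := by omega
      simp only [Function.comp_def, List.getD_cons_succ, List.getD_cons_zero, harith,
        Nat.add_zero, decide_eq_true_eq]
      split_ifs <;> omega

theorem counts_eq (p t : List Char) :
    (p.zipIdx).foldl (altStep t) (List.replicate (t.length + 1 - p.length) 0)
      = (List.range (t.length + 1 - p.length)).map
          (fun j => (List.range p.length).countP
            (fun i => decide (t.getD (j + i) ' ' ≠ p.getD i ' '))) := by
  apply List.ext_getElem
  · rw [length_foldl_altStep]; simp
  · intro j h1 h2
    have hj : j < (List.replicate (t.length + 1 - p.length) (0 : Nat)).length := by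
      have := h1; rw [length_foldl_altStep] at this; exact this
    rw [← List.getD_eq_getElem _ 0 h1, ← List.getD_eq_getElem _ 0 h2]
    rw [getD_foldl_altStep t p 0 _ j hj]
    rw [List.getD_eq_getElem _ 0 h2]
    simp [List.getElem_map]

theorem hamming_eq (p q : List Char) :
    hammingDistance p q
      = ((List.range p.length).countP (fun i => decide (p.getD i ' ' ≠ q.getD i ' ')) : Int) := by
  unfold hammingDistance
  rw [PySem.List.pyRange_one]
  have h0 : ((p.length : Int) - 0).toNat = p.length := by omega
  rw [h0, List.foldl_map]
  simp only [zero_add, PySem.List.pyGetD_natCast]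
  have h := PySem.List.foldl_count_if
    (fun i : Nat => decide (p.getD i ' ' ≠ q.getD i ' ')) (List.range p.length) 0
  simpa using h

theorem window_getD (t p : List Char) (j : Nat) (hwin : j + p.length ≤ t.length)
    (i : Nat) (hi : i < p.length) :
    (PySem.List.slice t (some (j : Int)) (some ((j : Int) + (p.length : Int)))).getD i ' '
      = t.getD (j + i) ' ' := by
  rw [PySem.List.slice_natCast_add]
  have h1 : i < (List.take p.length (List.drop j t)).length := by
    simp; omega
  have h2 : j + i < t.length := by omega
  rw [List.getD_eq_getElem _ _ h1, List.getD_eq_getElem _ _ h2]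
  simp [List.getElem_take, List.getElem_drop]

theorem perString (p t : List Char) (d : Int) :
    (PySem.List.pyRange 0 ((t.length : Int) - (p.length : Int) + 1) 1).any
      (fun j => decide (hammingDistance p
        (PySem.List.slice t (some j) (some (j + (p.length : Int)))) ≤ d))
      = altOk p t d := by
  simp only [altOk]
  rw [counts_eq, List.any_map, PySem.List.pyRange_one]
  have hm : (((t.length : Int) - (p.length : Int) + 1) - 0).toNat
      = t.length + 1 - p.length := by omega
  rw [hm, List.any_map]
  rw [Bool.eq_iff_iff, List.any_eq_true, List.any_eq_true]
  have key : ∀ j ∈ List.range (t.length + 1 - p.length),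
      decide (hammingDistance p
          (PySem.List.slice t (some ((0 : Int) + (j : Nat)))
            (some ((0 : Int) + (j : Nat) + (p.length : Int)))) ≤ d)
        = decide ((((List.range p.length).countP
            (fun i => decide (t.getD (j + i) ' ' ≠ p.getD i ' '))) : Int) ≤ d) := by
    intro j hj
    have hjm : j < t.length + 1 - p.length := List.mem_range.mp hj
    have hwin : j + p.length ≤ t.length := by omega
    rw [hamming_eq]
    have hz : ((0 : Int) + (j : Nat)) = ((j : Nat) : Int) := by omega
    rw [hz]
    congr 3
    apply List.countP_congr
    intro i hi
    have hi' : i < p.length := List.mem_range.mp hi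
    rw [window_getD t p j hwin i hi']
    simp [ne_comm]
  constructor
  · rintro ⟨j, hj, h⟩
    refine ⟨j, hj, ?_⟩
    simp only [Function.comp_apply] at h ⊢
    rw [← key j hj]
    exact h
  · rintro ⟨j, hj, h⟩
    refine ⟨j, hj, ?_⟩
    simp only [Function.comp_apply] at h ⊢
    rw [key j hj]
    exact h

-- ===== VERDICT (by name: the statement is the Claim_ definition above) =====
theorem inAllStrings_spec : Claim_equal_inAllStrings := by
  intro dna pattern d _
  unfold Spec_inAllStrings inAllStrings inAllStrings_alt
  exact congrArg _ (funext fun s => perString pattern.toList s.toList d)
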